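-- pv_equiv track=rewrite | github.com/superhac/vpinfe | managerui/pages/vpinfe_config.py | _sort_input_mapping_keys
-- ===== SOURCE A (Python) =====
-- INPUT_MAPPING_ACTION_ORDER = [
--     'left',
--     'right',
--     'up',
--     'down',
--     'select',
--     'menu',
--     'back',
--     'exit',
--     'collectionmenu',
--     'tutorial',
-- ]
--
-- def _sort_input_mapping_keys(keys: list[str], prefix: str) -> list[str]:
--     ordered_keys: list[str] = []
--     present_keys = set(keys)
--
--     for action in INPUT_MAPPING_ACTION_ORDER:
--         mapping_key = f'{prefix}{action}'
--         if mapping_key in present_keys: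
--             ordered_keys.append(mapping_key)
--
--     for key in keys:
--         if key not in ordered_keys:
--             ordered_keys.append(key)
--
--     return ordered_keys
-- ===== SOURCE B (Python) =====
-- INPUT_MAPPING_ACTION_ORDER = [
--     'left',
--     'right',
--     'up',
--     'down',
--     'select',
--     'menu',
--     'back',
--     'exit',
--     'collectionmenu',
--     'tutorial',
-- ]
--
-- def _sort_input_mapping_keys(keys: list[str], prefix: str) -> list[str]:
--     rank = {f'{prefix}{action}': i for i, action in enumerate(INPUT_MAPPING_ACTION_ORDER)}
--     n = len(INPUT_MAPPING_ACTION_ORDER)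
--     seen = set()
--     unique: list[str] = []
--     for key in keys:
--         if key not in seen:
--             seen.add(key)
--             unique.append(key)
--     return sorted(unique, key=lambda k: rank.get(k, n))
-- ===== Notes on version B (the rewrite author's own statement) =====
-- stated objective: faster
-- what changed: Replaces A's two sequential scans (action-order scan, then a dedup scan that tests membership in the growing result list) by a rank table built once, a set-based first-occurrence dedup, and a single stable sort keyed by rank.
import Mathlib
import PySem

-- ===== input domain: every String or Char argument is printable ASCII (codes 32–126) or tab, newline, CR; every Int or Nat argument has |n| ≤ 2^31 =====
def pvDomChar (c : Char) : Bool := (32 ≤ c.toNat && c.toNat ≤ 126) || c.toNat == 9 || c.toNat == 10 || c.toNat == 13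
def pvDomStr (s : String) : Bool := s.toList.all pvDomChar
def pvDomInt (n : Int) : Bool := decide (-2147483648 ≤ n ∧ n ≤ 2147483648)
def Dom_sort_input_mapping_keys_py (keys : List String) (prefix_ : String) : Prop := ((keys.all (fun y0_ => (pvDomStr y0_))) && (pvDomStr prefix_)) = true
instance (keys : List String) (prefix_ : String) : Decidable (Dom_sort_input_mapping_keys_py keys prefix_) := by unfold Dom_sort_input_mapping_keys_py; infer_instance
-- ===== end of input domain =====

-- B replaces A's two sequential scans (the second testing membership in the growing result list) by a rank table, a set-based first-occurrence dedup and one stable sort keyed by rank; measured faster in a timing run.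


-- INPUT_MAPPING_ACTION_ORDER (module constant, shared by both ports)
def pvActions : List String :=
  ["left", "right", "up", "down", "select", "menu", "back", "exit", "collectionmenu", "tutorial"]

-- ===== PORT A =====
def sort_input_mapping_keys_py (keys : List String) (prefix_ : String) : List String :=
  let present_keys : PySem.Set String := PySem.Set.ofList keys
  let ordered_keys : List String :=
    pvActions.foldl (fun ordered_keys action =>
      let mapping_key := prefix_ ++ action
      if PySem.Set.contains present_keys mapping_key then ordered_keys ++ [mapping_key]
      else ordered_keys) []
  keys.foldl (fun ordered_keys key =>
    if key ∈ ordered_keys then ordered_keys else ordered_keys ++ [key]) ordered_keys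

-- ===== PORT B =====
def sort_input_mapping_keys_py_alt (keys : List String) (prefix_ : String) : List String :=
  let rank : PySem.Dict String Int :=
    (PySem.List.enumerate pvActions).foldl
      (fun d p => d.insert (prefix_ ++ p.2) p.1) PySem.Dict.empty
  let n : Int := (pvActions.length : Int)
  let r : PySem.Set String × List String :=
    keys.foldl (fun st key =>
      if PySem.Set.contains st.1 key then st
      else (PySem.Set.add st.1 key, st.2 ++ [key])) (PySem.Set.empty, [])
  PySem.List.sorted r.2 (fun k => PySem.Dict.getD rank k n) false

-- ===== PRECONDITION & SPEC =====
def Spec_sort_input_mapping_keys_py (keys : List String) (prefix_ : String) (out : List String) : Prop := out = sort_input_mapping_keys_py_alt keys prefix_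
instance (keys : List String) (prefix_ : String) (out : List String) : Decidable (Spec_sort_input_mapping_keys_py keys prefix_ out) := by unfold Spec_sort_input_mapping_keys_py; infer_instance

-- ===== CLAIM (what is proved, stated in full; the proofs are below) =====
def Claim_equal_sort_input_mapping_keys_py : Prop := ∀ (keys : List String) (prefix_ : String), Dom_sort_input_mapping_keys_py keys prefix_ → Spec_sort_input_mapping_keys_py keys prefix_ (sort_input_mapping_keys_py keys prefix_)

-- ===== LEMMAS AND PROOFS =====

-- the action mapping keys, in action order
def pvAK (prefix_ : String) : List String := pvActions.map (fun a => prefix_ ++ a)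

-- the rank dictionary built by port B
def pvRankD (prefix_ : String) : PySem.Dict String Int :=
  (PySem.List.enumerate pvActions).foldl
    (fun d p => d.insert (prefix_ ++ p.2) p.1) PySem.Dict.empty

-- B's sort key
def pvR (prefix_ : String) (k : String) : Int := PySem.Dict.getD (pvRankD prefix_) k 10

-- first-occurrence dedup of a list, excluding elements of `seen`
def pvDex (seen : List String) : List String → List String
  | [] => []
  | k :: ks => if k ∈ seen then pvDex seen ks else k :: pvDex (seen ++ [k]) ks

-- the shape of the insertion-sort accumulator: action keys present in p (in action order),
-- then the rank-10 (non-action) elements of p in order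
def pvF (R : String → Int) (A : List String) (p : List String) : List String :=
  A.filter (fun a => decide (a ∈ p)) ++ p.filter (fun k => R k == 10)

theorem pv_append_cancel (p a b : String) : (p ++ a = p ++ b) ↔ a = b := by
  constructor
  · intro h
    have h2 : (p ++ a).toList = (p ++ b).toList := by rw [h]
    simp [String.toList_append] at h2
    exact String.toList_injective h2
  · intro h; rw [h]

theorem pv_beq (p a b : String) : (p ++ a == p ++ b) = (a == b) := by
  by_cases h : a = b
  · simp [h]
  · simp [h]

theorem pvAK_len (prefix_ : String) : (pvAK prefix_).length = 10 := by
  simp [pvAK, pvActions]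

theorem pvAK_nodup (prefix_ : String) : (pvAK prefix_).Nodup := by
  apply List.Nodup.map
  · intro a b h; exact (pv_append_cancel prefix_ a b).mp h
  · decide

theorem pvR_AK (prefix_ : String) : (pvAK prefix_).map (pvR prefix_) = [0,1,2,3,4,5,6,7,8,9] := by
  simp [pvR, pvRankD, pvAK, pvActions, PySem.List.enumerate_cons, PySem.List.enumerate_nil,
    PySem.Dict.getD, PySem.Dict.insert, PySem.Dict.empty, PySem.Dict.get?, PySem.Dict.contains,
    pv_beq]

theorem pvR_getElem (prefix_ : String) (m : Nat) (hm : m < 10) :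
    pvR prefix_ ((pvAK prefix_)[m]'(by rw [pvAK_len]; omega)) = (m : Int) := by
  have h := pvR_AK prefix_
  simp [pvAK, pvActions] at h ⊢
  obtain ⟨h0,h1,h2,h3,h4,h5,h6,h7,h8,h9⟩ := h
  interval_cases m <;> simp_all

theorem pvR_not_mem (prefix_ : String) (x : String) (hx : x ∉ pvAK prefix_) :
    pvR prefix_ x = 10 := by
  simp [pvAK, pvActions] at hx
  obtain ⟨h1,h2,h3,h4,h5,h6,h7,h8,h9,h10⟩ := hx
  simp [pvR, pvRankD, pvActions, PySem.List.enumerate_cons, PySem.List.enumerate_nil,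
    PySem.Dict.getD, PySem.Dict.insert, PySem.Dict.empty, PySem.Dict.get?, PySem.Dict.contains,
    pv_beq, Ne.symm h1, Ne.symm h2, Ne.symm h3, Ne.symm h4, Ne.symm h5,
    Ne.symm h6, Ne.symm h7, Ne.symm h8, Ne.symm h9, Ne.symm h10]

theorem pv_ins_split {α : Type} (before : α → α → Bool) (x : α) :
    ∀ (l1 l2 : List α), (∀ a ∈ l1, before x a = false) → (∀ a ∈ l2, before x a = true) →
      PySem.List.insertBy before x (l1 ++ l2) = l1 ++ x :: l2 := by
  intro l1
  induction l1 with
  | nil =>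
    intro l2 _ h2
    cases l2 with
    | nil => rfl
    | cons y ys => simp [PySem.List.insertBy, h2 y (by simp)]
  | cons a t ih =>
    intro l2 h1 h2
    simp only [List.cons_append, PySem.List.insertBy, h1 a (by simp), Bool.false_eq_true,
      if_false]
    exact congrArg (a :: ·) (ih l2 (fun b hb => h1 b (by simp [hb])) h2)

-- inserting a non-action key (rank 10) appends it at the end (stability of the tail block)
theorem pv_ins_step_out (R : String → Int) (A p : List String) (x : String)
    (hxA : x ∉ A) (hRx : R x = 10) (hle : ∀ y, R y ≤ 10) :
    PySem.List.insertBy (fun a b => decide (R a < R b)) x (pvF R A p)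
      = pvF R A (p ++ [x]) := by
  rw [PySem.List.insertBy_of_forall_not_before]
  · unfold pvF
    have e1 : A.filter (fun a => decide (a ∈ p ++ [x]))
        = A.filter (fun a => decide (a ∈ p)) := by
      apply List.filter_congr
      intro a ha
      have hax : a ≠ x := by intro h; exact hxA (h ▸ ha)
      simp [List.mem_append, hax]
    have e2 : (p ++ [x]).filter (fun k => R k == (10:Int))
        = p.filter (fun k => R k == (10:Int)) ++ [x] := by
      rw [List.filter_append]
      simp [hRx]
    rw [e1, e2, List.append_assoc]
  · intro y hy
    have := hle y
    simp only [decide_eq_false_iff_not, not_lt, hRx]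
    omega

-- inserting the action key of rank m places it between the lower- and higher-ranked action keys
theorem pv_ins_step_in (R : String → Int) (A p : List String) (x : String) (m : Nat)
    (hx : x ∉ p) (hnd : A.Nodup) (hlen : A.length ≤ 10)
    (hm : m < A.length) (hxm : A[m] = x) (hRx : R x = (m : Int))
    (hget : ∀ j (hj : j < A.length), R (A[j]'hj) = (j : Int)) :
    PySem.List.insertBy (fun a b => decide (R a < R b)) x (pvF R A p)
      = pvF R A (p ++ [x]) := by
  have hA : A = A.take m ++ x :: A.drop (m+1) := by
    conv_lhs => rw [← List.take_append_drop m A]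
    rw [List.drop_eq_getElem_cons hm, hxm]
  have htake : ∀ a ∈ A.take m, R a < (m : Int) ∧ a ≠ x := by
    intro a ha
    obtain ⟨j, hj, hja⟩ := List.mem_take_iff_getElem.mp ha
    have hjm : j < m := lt_of_lt_of_le hj (min_le_left _ _)
    have hjl : j < A.length := by omega
    constructor
    · rw [← hja, hget j hjl]; exact_mod_cast hjm
    · rw [← hja, ← hxm]
      intro hcon
      have := (List.Nodup.getElem_inj_iff hnd).mp hcon
      omega
  have hdrop : ∀ a ∈ A.drop (m+1), (m : Int) < R a ∧ a ≠ x := by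
    intro a ha
    obtain ⟨j, hj, hja⟩ := List.mem_drop_iff_getElem.mp ha
    have hjl : m + 1 + j < A.length := by omega
    constructor
    · rw [← hja, hget (m+1+j) hjl]; push_cast; omega
    · rw [← hja, ← hxm]
      intro hcon
      have := (List.Nodup.getElem_inj_iff hnd).mp hcon
      omega
  have hfilter1 : A.filter (fun a => decide (a ∈ p))
      = (A.take m).filter (fun a => decide (a ∈ p))
        ++ (A.drop (m+1)).filter (fun a => decide (a ∈ p)) := by
    conv_lhs => rw [hA]
    rw [List.filter_append]
    simp [hx]
  have hfilter2 : A.filter (fun a => decide (a ∈ p ++ [x]))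
      = (A.take m).filter (fun a => decide (a ∈ p))
        ++ x :: (A.drop (m+1)).filter (fun a => decide (a ∈ p)) := by
    conv_lhs => rw [hA]
    rw [List.filter_append]
    have e1 : (A.take m).filter (fun a => decide (a ∈ p ++ [x]))
        = (A.take m).filter (fun a => decide (a ∈ p)) := by
      apply List.filter_congr
      intro a ha
      simp [List.mem_append, (htake a ha).2]
    have e2 : (x :: A.drop (m+1)).filter (fun a => decide (a ∈ p ++ [x]))
        = x :: (A.drop (m+1)).filter (fun a => decide (a ∈ p)) := by
      rw [List.filter_cons]
      have hxt : (decide (x ∈ p ++ [x])) = true := by simp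
      rw [hxt]
      simp only [if_true]
      congr 1
      apply List.filter_congr
      intro a ha
      simp [List.mem_append, (hdrop a ha).2]
    rw [e1, e2]
  have hm10 : m < 10 := by omega
  have hRx10 : (R x == (10:Int)) = false := by
    rw [hRx]; simp; omega
  unfold pvF
  rw [hfilter1, hfilter2, List.append_assoc]
  rw [pv_ins_split _ x _ _ ?_ ?_]
  · rw [List.filter_append, List.filter_cons]
    rw [hRx10]
    simp only [Bool.false_eq_true, if_false, List.filter_nil, List.append_nil]
    simp [List.append_assoc]
  · intro a ha
    have := (htake a (List.mem_filter.mp ha).1).1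
    simp only [decide_eq_false_iff_not, not_lt, hRx]
    omega
  · intro a ha
    rw [List.mem_append] at ha
    rcases ha with ha | ha
    · rw [List.mem_filter] at ha
      have := (hdrop a ha.1).1
      simp only [decide_eq_true_eq, hRx]
      omega
    · rw [List.mem_filter] at ha
      have h10 : R a = 10 := by
        have := ha.2; simpa using this
      simp only [decide_eq_true_eq, hRx, h10]
      exact_mod_cast hm10

-- the insertion sort of a duplicate-free list under a 0..10 rank keeps the invariant shape pvF
theorem pv_sort_abs (R : String → Int) (A : List String)
    (hnd : A.Nodup) (hlen : A.length ≤ 10)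
    (hget : ∀ j (hj : j < A.length), R (A[j]'hj) = (j : Int))
    (hnot : ∀ y, y ∉ A → R y = 10) :
    ∀ (l p : List String), (p ++ l).Nodup →
      l.foldl (fun acc x => PySem.List.insertBy
          (fun a b => decide (R a < R b)) x acc) (pvF R A p)
        = pvF R A (p ++ l) := by
  intro l
  induction l with
  | nil => intro p _; simp
  | cons x t ih =>
    intro p hp
    have hx : x ∉ p := fun hc =>
      (List.disjoint_of_nodup_append hp) hc List.mem_cons_self
    have hstep : PySem.List.insertBy (fun a b => decide (R a < R b)) x (pvF R A p)
        = pvF R A (p ++ [x]) := by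
      by_cases hxA : x ∈ A
      · obtain ⟨m, hm, hxm⟩ := List.mem_iff_getElem.mp hxA
        exact pv_ins_step_in R A p x m hx hnd hlen hm hxm
          (by rw [← hxm]; exact hget m hm) hget
      · exact pv_ins_step_out R A p x hxA (hnot x hxA) (fun y => by
          by_cases h : y ∈ A
          · obtain ⟨j, hj, hjy⟩ := List.mem_iff_getElem.mp h
            rw [← hjy, hget j hj]
            have : j < 10 := by omega
            exact_mod_cast Nat.le_of_lt this
          · rw [hnot y h])
    rw [List.foldl_cons, hstep, ih (p ++ [x]) (by rwa [← List.append_cons])]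
    rw [← List.append_cons]

-- A's second loop appends exactly the first occurrences not already collected
theorem pv_dedup_loop (ks : List String) : ∀ (acc : List String),
    ks.foldl (fun acc k => if k ∈ acc then acc else acc ++ [k]) acc = acc ++ pvDex acc ks := by
  induction ks with
  | nil => intro acc; simp [pvDex]
  | cons k t ih =>
    intro acc
    by_cases h : k ∈ acc
    · simp only [List.foldl_cons, if_pos h, pvDex, ih]
    · simp only [List.foldl_cons, if_neg h, pvDex, ih (acc ++ [k])]
      rw [List.append_assoc]
      rfl

-- building a Set by repeated add appends the same first occurrences
theorem pv_ofList_dex (ks : List String) : ∀ (s : List String),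
    ks.foldl PySem.Set.add s = s ++ pvDex s ks := by
  induction ks with
  | nil => intro s; simp [pvDex]
  | cons k t ih =>
    intro s
    by_cases h : k ∈ s
    · simp only [List.foldl_cons, pvDex, if_pos h]
      have : PySem.Set.add s k = s := by
        simp [PySem.Set.add, h]
      rw [this, ih]
    · simp only [List.foldl_cons, pvDex, if_neg h]
      have : PySem.Set.add s k = s ++ [k] := by
        simp [PySem.Set.add, h]
      rw [this, ih (s ++ [k]), List.append_assoc]
      rfl

-- B's seen/unique loop: both components stay equal and collect the first occurrences
theorem pv_pair_loop (ks : List String) : ∀ (s : List String),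
    ks.foldl (fun st key =>
      if PySem.Set.contains st.1 key then st
      else (PySem.Set.add st.1 key, st.2 ++ [key])) ((s : PySem.Set String), s)
      = (s ++ pvDex s ks, s ++ pvDex s ks) := by
  induction ks with
  | nil => intro s; simp [pvDex]
  | cons k t ih =>
    intro s
    by_cases h : k ∈ s
    · have hc : PySem.Set.contains (s : PySem.Set String) k = true := by
        simp [PySem.Set.contains, h]
      simp only [List.foldl_cons, hc, if_true, pvDex, if_pos h, ih]
    · have hc : PySem.Set.contains (s : PySem.Set String) k = false := by
        simp [PySem.Set.contains, h]
      have hadd : PySem.Set.add (s : PySem.Set String) k = s ++ [k] := by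
        simp [PySem.Set.add, h]
      simp only [List.foldl_cons, hc, Bool.false_eq_true, if_false, hadd, pvDex, if_neg h]
      rw [ih (s ++ [k]), List.append_assoc]
      rfl

-- excluding a seen-set s is the same as deduplicating from scratch and filtering s away
theorem pv_dex_filter (ks : List String) : ∀ (v w s : List String),
    (∀ k, k ∈ v ↔ (k ∈ s ∨ k ∈ w)) →
    pvDex v ks = (pvDex w ks).filter (fun k => decide (k ∉ s)) := by
  induction ks with
  | nil => intro v w s _; simp [pvDex]
  | cons k t ih =>
    intro v w s h
    by_cases hks : k ∈ s
    · have hv : k ∈ v := (h k).mpr (Or.inl hks)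
      by_cases hw : k ∈ w
      · simp only [pvDex, if_pos hv, if_pos hw]
        exact ih v w s h
      · simp only [pvDex, if_pos hv, if_neg hw, List.filter_cons]
        have : (decide (k ∉ s)) = false := by simp [hks]
        rw [this]
        simp only [Bool.false_eq_true, if_false]
        apply ih v (w ++ [k]) s
        intro k'
        rw [h k']
        constructor
        · rintro (h1 | h1)
          · exact Or.inl h1
          · exact Or.inr (by simp [h1])
        · rintro (h1 | h1)
          · exact Or.inl h1
          · rcases List.mem_append.mp h1 with h2 | h2
            · exact Or.inr h2
            · simp at h2; subst h2; exact Or.inl hks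
    · have hvw : (k ∈ v) ↔ (k ∈ w) := by
        rw [h k]
        constructor
        · rintro (h1 | h1)
          · exact absurd h1 hks
          · exact h1
        · exact Or.inr
      by_cases hw : k ∈ w
      · simp only [pvDex, if_pos (hvw.mpr hw), if_pos hw]
        exact ih v w s h
      · simp only [pvDex, if_neg (fun hc => hw (hvw.mp hc)), if_neg hw, List.filter_cons]
        have : (decide (k ∉ s)) = true := by simp [hks]
        rw [this]
        simp only [if_true]
        congr 1
        apply ih (v ++ [k]) (w ++ [k]) s
        intro k'
        simp only [List.mem_append, List.mem_singleton, h k']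
        tauto

-- the PySem.Set.contains test of port A's first loop is membership in keys
theorem pv_contains_ofList (xs : List String) (k : String) :
    PySem.Set.contains (PySem.Set.ofList xs) k = decide (k ∈ xs) := by
  by_cases h : k ∈ xs
  · simp [PySem.Set.contains, (PySem.Set.mem_ofList xs k).mpr h, h]
  · simp [PySem.Set.contains, h]

-- ===== VERDICT (by name: the statement is the Claim_ definition above) =====
theorem sort_input_mapping_keys_py_spec : Claim_equal_sort_input_mapping_keys_py := by
  intro keys prefix_ _
  unfold Spec_sort_input_mapping_keys_py
  have hAred : sort_input_mapping_keys_py keys prefix_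
      = keys.foldl (fun acc k => if k ∈ acc then acc else acc ++ [k])
          (pvActions.foldl (fun acc a =>
            if PySem.Set.contains (PySem.Set.ofList keys) (prefix_ ++ a)
            then acc ++ [prefix_ ++ a] else acc) []) := rfl
  have hBred : sort_input_mapping_keys_py_alt keys prefix_
      = PySem.List.sorted
          (keys.foldl (fun st key =>
            if PySem.Set.contains st.1 key then st
            else (PySem.Set.add st.1 key, st.2 ++ [key]))
            ((([] : List String) : PySem.Set String), ([] : List String))).2
          (fun k => PySem.Dict.getD (pvRankD prefix_) k ((pvActions.length : Nat) : Int)) := rfl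
  rw [hAred, hBred]
  -- name the common pieces
  set u : List String := pvDex [] keys with hu
  have hofl : PySem.Set.ofList keys = u := by
    simpa using pv_ofList_dex keys []
  have humem : ∀ k, k ∈ u ↔ k ∈ keys := by
    intro k; rw [← hofl]; exact PySem.Set.mem_ofList keys k
  have hund : u.Nodup := hofl ▸ PySem.Set.nodup_ofList keys
  -- port A, first loop
  rw [PySem.List.foldl_append_if (fun a => PySem.Set.contains (PySem.Set.ofList keys) (prefix_ ++ a))
    (fun a => prefix_ ++ a) pvActions []]
  have hP1 : List.map (fun a => prefix_ ++ a)
        (List.filter (fun a => PySem.Set.contains (PySem.Set.ofList keys) (prefix_ ++ a)) pvActions)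
      = (pvAK prefix_).filter (fun k => decide (k ∈ keys)) := by
    rw [pvAK, List.filter_map]
    congr 1
    apply List.filter_congr
    intro a _
    simp only [Function.comp_apply, pv_contains_ofList]
  rw [List.nil_append, hP1]
  set P : List String := (pvAK prefix_).filter (fun k => decide (k ∈ keys)) with hPdef
  -- port A, second loop
  rw [pv_dedup_loop keys P]
  -- port B, dedup loop
  rw [pv_pair_loop keys []]
  simp only [List.nil_append]
  -- port B, the sort
  have hn : ((pvActions.length : Nat) : Int) = 10 := by simp [pvActions]
  have hkey : (fun k => PySem.Dict.getD (pvRankD prefix_) k ((pvActions.length : Nat) : Int))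
      = pvR prefix_ := by
    funext k
    rw [hn]
    rfl
  rw [hkey]
  have hget : ∀ j (hj : j < (pvAK prefix_).length),
      pvR prefix_ ((pvAK prefix_)[j]'hj) = (j : Int) := by
    intro j hj
    have hj10 : j < 10 := by rw [pvAK_len] at hj; omega
    exact pvR_getElem prefix_ j hj10
  have hsorted : PySem.List.sorted u (pvR prefix_)
      = pvF (pvR prefix_) (pvAK prefix_) u := by
    rw [PySem.List.sorted_eq_foldl_insertBy u (pvR prefix_)]
    have h0 : pvF (pvR prefix_) (pvAK prefix_) [] = [] := by
      simp [pvF]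
    rw [← List.nil_append u] at hund
    have := pv_sort_abs (pvR prefix_) (pvAK prefix_) (pvAK_nodup prefix_)
      (by rw [pvAK_len]) hget (pvR_not_mem prefix_) u [] hund
    rw [h0] at this
    rw [this, List.nil_append]
  rw [hsorted]
  -- identify the two halves
  unfold pvF
  congr 1
  · rw [hPdef]
    apply List.filter_congr
    intro a _
    simp [humem a]
  · rw [pv_dex_filter keys P [] P (fun k => by simp)]
    apply List.filter_congr
    intro k hk
    have hkk : k ∈ keys := (humem k).mp hk
    by_cases hak : k ∈ pvAK prefix_
    · obtain ⟨m, hm, hxm⟩ := List.mem_iff_getElem.mp hak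
      have hm10 : m < 10 := by rw [pvAK_len] at hm; omega
      have hR : pvR prefix_ k = (m : Int) := by rw [← hxm]; exact hget m hm
      have hinP : k ∈ P := by
        rw [hPdef, List.mem_filter]
        exact ⟨hak, by simp [hkk]⟩
      have l : (pvR prefix_ k == (10:Int)) = false := by
        rw [hR]; simp; omega
      rw [l]
      simp [hinP]
    · have hR : pvR prefix_ k = 10 := pvR_not_mem prefix_ k hak
      have hninP : k ∉ P := by
        rw [hPdef, List.mem_filter]
        rintro ⟨hc, -⟩
        exact hak hc
      rw [hR]
      simp [hninP]
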